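-- pv_equiv track=rewrite | github.com/maxcan7/codingchallenge_librarydata | librarydata_preprocess.py | split_var
-- ===== SOURCE A (Python) =====
-- def split_var(config, loc):
--     '''
--     Split variables from config['split_from'] to config['split_to']
--     '''
--     for s in range(len(config['split_from'])):
--         if config['splitter'][s] != '':  # Get rid of newline, split the variable into a list of two
--             splitvar = loc.pop(config['split_from'][s]).replace('\n', '').split(config['splitter'][s])
--         else:  # Use an empty splitter
--             splitvar = loc.pop(config['split_from'][s]).replace('\n', '').split()
--         splitto = config['split_to'][s].split(',')  # Subset the split variables
--         while splitto:  # Insert split variable into loc until all have been reinserted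
--             if len(splitvar) >= 1:
--                 loc[splitto.pop()] = splitvar.pop()
--             else:
--                 loc[splitto.pop()] = ''
--     return loc
-- ===== SOURCE B (Python) =====
-- def split_var(config, loc):
--     '''
--     Split variables from config['split_from'] to config['split_to']
--     '''
--     if not config['split_from']:
--         return loc
--     for src, sep, dst in zip(config['split_from'], config['splitter'], config['split_to']):
--         raw = loc.pop(src).replace('\n', '')
--         parts = raw.split(sep) if sep != '' else raw.split()
--         targets = dst.split(',')
--         gap = len(targets) - len(parts)
--         i = len(targets)
--         while i > 0:  # assign end-to-front by index arithmetic, no destructive pops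
--             i -= 1
--             loc[targets[i]] = parts[i - gap] if i >= gap else ''
--     return loc
-- ===== Notes on version B (the rewrite author's own statement) =====
-- stated objective: alternative
-- what changed: B iterates over the zipped (source, splitter, target) config rows and fills each target slot non-destructively by index arithmetic (targets[i] gets parts[i-gap] or '' when i < gap, counting i down), instead of A's index-range loop with a destructive while loop popping both the target and part lists.
import Mathlib
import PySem

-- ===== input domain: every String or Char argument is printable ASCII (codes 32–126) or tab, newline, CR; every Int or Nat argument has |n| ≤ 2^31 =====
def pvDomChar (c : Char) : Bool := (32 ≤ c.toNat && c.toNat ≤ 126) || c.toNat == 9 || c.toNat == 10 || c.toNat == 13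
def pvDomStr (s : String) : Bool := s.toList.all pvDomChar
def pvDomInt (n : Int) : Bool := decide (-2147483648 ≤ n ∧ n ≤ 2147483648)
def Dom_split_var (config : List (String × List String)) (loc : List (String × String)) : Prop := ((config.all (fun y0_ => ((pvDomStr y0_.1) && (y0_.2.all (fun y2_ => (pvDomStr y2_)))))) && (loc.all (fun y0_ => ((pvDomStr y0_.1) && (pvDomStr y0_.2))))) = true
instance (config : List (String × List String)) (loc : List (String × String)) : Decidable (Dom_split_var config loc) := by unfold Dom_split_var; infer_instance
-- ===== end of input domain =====

-- B iterates over the zipped (source, splitter, target) rows and fills each target slot by index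
-- arithmetic (targets[i] gets parts[i-gap], or '' when i < gap), counting i down, instead of A's
-- destructive while loop popping both lists; same return value.
-- Python note: both A and B mutate loc in place in the same way; the equivalence is about the returned dict.

-- ===== PORT A =====

-- loc.pop(k): value and remaining dict; Python raises KeyError on a missing key (excluded by Pre_)
def pvPop (loc : PySem.Dict String String) (k : String) : String × PySem.Dict String String :=
  match loc.pop? k with
  | some r => r
  | none => ("", loc)

-- the 'while splitto:' loop: pop the last target and the last part (or '')
def splitA_while (splitto splitvar : List String) (loc : PySem.Dict String String) :
    PySem.Dict String String :=
  if h : splitto = [] then loc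
  else
    let rest := splitto.dropLast
    let t := splitto.getLast h
    if splitvar.length ≥ 1 then
      splitA_while rest splitvar.dropLast (loc.insert t ((splitvar.getLast?).getD ""))
    else
      splitA_while rest splitvar (loc.insert t "")
  termination_by splitto.length
  decreasing_by
    all_goals (have := List.length_pos_of_ne_nil h; simp [List.length_dropLast]; omega)

-- one iteration of A's for-loop (index s; out-of-range indexing raises in Python — excluded by Pre_)
def splitA_step (sf sp st : List String) (loc : PySem.Dict String String) (s : Int) :
    PySem.Dict String String :=
  let pr := pvPop loc (PySem.List.pyGetD sf s "")
  let raw := PySem.Str.replace pr.1 "\n" ""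
  let splitvar :=
    if PySem.List.pyGetD sp s "" ≠ "" then (PySem.Str.split? raw (PySem.List.pyGetD sp s "")).getD []
    else PySem.Str.split₀ raw
  let splitto := (PySem.Str.split? (PySem.List.pyGetD st s "") ",").getD []
  splitA_while splitto splitvar pr.2

def split_var (config : List (String × List String)) (loc : List (String × String)) :
    List (String × String) :=
  let d := PySem.Dict.mk config
  let sf := (d.get? "split_from").getD []
  let sp := (d.get? "splitter").getD []
  let st := (d.get? "split_to").getD []
  ((PySem.List.pyRange 0 (sf.length : Int) 1).foldl (fun acc s => splitA_step sf sp st acc s)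
      (PySem.Dict.mk loc)).items

-- ===== PORT B =====

-- 'while i > 0: i -= 1; loc[targets[i]] = parts[i-gap] if i >= gap else ""'
def splitB_assign (targets parts : List String) (gap : Int) (i : Nat)
    (loc : PySem.Dict String String) : PySem.Dict String String :=
  match i with
  | 0 => loc
  | Nat.succ j =>
    let v := if (j : Int) ≥ gap then PySem.List.pyGetD parts ((j : Int) - gap) "" else ""
    splitB_assign targets parts gap j (loc.insert (PySem.List.pyGetD targets (j : Int) "") v)

-- 'for src, sep, dst in zip(...)'
def splitB_rows (rows : List (String × String × String)) (loc : PySem.Dict String String) :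
    PySem.Dict String String :=
  match rows with
  | [] => loc
  | (src, sep, dst) :: rest =>
    let pr := match loc.pop? src with
      | some r => r
      | none => ("", loc)
    let raw := PySem.Str.replace pr.1 "\n" ""
    let parts := if sep ≠ "" then (PySem.Str.split? raw sep).getD [] else PySem.Str.split₀ raw
    let targets := (PySem.Str.split? dst ",").getD []
    splitB_rows rest
      (splitB_assign targets parts ((targets.length : Int) - (parts.length : Int))
        targets.length pr.2)

def split_var_alt (config : List (String × List String)) (loc : List (String × String)) :
    List (String × String) :=
  let d := PySem.Dict.mk config
  let sf := (d.get? "split_from").getD []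
  if sf.isEmpty then (PySem.Dict.mk loc).items
  else
    let sp := (d.get? "splitter").getD []
    let st := (d.get? "split_to").getD []
    (splitB_rows (sf.zip (sp.zip st)) (PySem.Dict.mk loc)).items

-- ===== PRECONDITION & SPEC =====

-- split_to[t] split at ',' (for Pre_ only)
def pvTargets (st : List String) (t : Nat) : List String :=
  (PySem.Str.split? (st.getD t "") ",").getD []

-- Pre_ = exactly the inputs on which A returns: the three config keys exist, splitter and split_to are at
-- least as long as split_from, and each split_from[s] is present in loc when iteration s pops it (it was
-- either reinserted by the latest earlier iteration that mentions it as a target, or is an untouched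
-- original key) — otherwise Python raises KeyError/IndexError.
def pvPreCore (sf sp st : List String) (loc : List (String × String)) : Bool :=
  (decide (sf.length ≤ sp.length)) && (decide (sf.length ≤ st.length)) &&
  (List.range sf.length).all (fun s =>
    ((List.range s).any (fun t =>
        (pvTargets st t).contains (sf.getD s "") &&
        (List.range s).all (fun u => decide (u ≤ t) ||
          (decide (sf.getD u "" ≠ sf.getD s "") && !(pvTargets st u).contains (sf.getD s ""))))) ||
    ((PySem.Dict.mk loc).contains (sf.getD s "") &&
      (List.range s).all (fun t =>
        decide (sf.getD t "" ≠ sf.getD s "") && !(pvTargets st t).contains (sf.getD s ""))))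

def Pre_split_var (config : List (String × List String)) (loc : List (String × String)) : Prop :=
  (match (PySem.Dict.mk config).get? "split_from" with
  | none => false
  | some sf =>
    sf.isEmpty ||
    (match (PySem.Dict.mk config).get? "splitter", (PySem.Dict.mk config).get? "split_to" with
     | some sp, some st => pvPreCore sf sp st loc
     | _, _ => false)) = true

instance (config : List (String × List String)) (loc : List (String × String)) :
    Decidable (Pre_split_var config loc) := by unfold Pre_split_var; infer_instance

def pvWitness_split_var : (List (String × List String)) × (List (String × String)) :=
  ([("split_from", ["n"]), ("splitter", [" "]), ("split_to", ["a,b"])], [("n", "x y")])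

def Spec_split_var (config : List (String × List String)) (loc : List (String × String))
    (out : List (String × String)) : Prop := out = split_var_alt config loc

instance (config : List (String × List String)) (loc : List (String × String))
    (out : List (String × String)) : Decidable (Spec_split_var config loc out) := by
  unfold Spec_split_var; infer_instance

-- ===== CLAIM (what is proved, stated in full; the proofs are below) =====
def Claim_equal_split_var : Prop := ∀ (config : List (String × List String)) (loc : List (String × String)), Dom_split_var config loc → Pre_split_var config loc → Spec_split_var config loc (split_var config loc)

-- ===== LEMMAS AND PROOFS =====

-- A's while loop, read from the reversed lists
def pvGoRev (rt rv : List String) (loc : PySem.Dict String String) : PySem.Dict String String :=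
  match rt, rv with
  | [], _ => loc
  | t :: rt, [] => pvGoRev rt [] (loc.insert t "")
  | t :: rt, v :: rv => pvGoRev rt rv (loc.insert t v)

theorem splitA_while_eq_goRev (rt rv : List String) (loc : PySem.Dict String String) :
    splitA_while rt.reverse rv.reverse loc = pvGoRev rt rv loc := by
  induction rt generalizing rv loc with
  | nil => simp [splitA_while, pvGoRev]
  | cons t rt ih =>
    rw [splitA_while]
    match rv with
    | [] =>
      simp only [List.reverse_cons, List.reverse_nil]
      rw [dif_neg (by simp)]
      simp only [List.dropLast_concat, List.getLast_append, List.length_nil]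
      rw [if_neg (by omega)]
      have := ih [] (loc.insert t "")
      simpa [pvGoRev] using this
    | v :: rv =>
      simp only [List.reverse_cons]
      rw [dif_neg (by simp)]
      simp only [List.dropLast_concat, List.getLast_append, List.length_append,
        List.length_reverse, List.length_cons, List.getLast?_concat,
        List.isEmpty_cons, Bool.false_eq_true, dite_false, List.getLast_singleton]
      rw [if_pos (by omega)]
      simp only [Option.getD_some]
      rw [ih rv (loc.insert t v)]
      simp [pvGoRev]

-- extensionality for B's countdown loop: only the looked-up values matter
theorem splitB_assign_ext (i : Nat) (ts ts' vs vs' : List String) (g g' : Int)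
    (ht : ∀ j, j < i → PySem.List.pyGetD ts (j : Int) "" = PySem.List.pyGetD ts' (j : Int) "")
    (hv : ∀ j, j < i →
      (if (j : Int) ≥ g then PySem.List.pyGetD vs ((j : Int) - g) "" else "") =
      (if (j : Int) ≥ g' then PySem.List.pyGetD vs' ((j : Int) - g') "" else "")) :
    ∀ loc, splitB_assign ts vs g i loc = splitB_assign ts' vs' g' i loc := by
  induction i with
  | zero => intro loc; rfl
  | succ j ih =>
    intro loc
    show splitB_assign ts vs g j _ = splitB_assign ts' vs' g' j _
    rw [hv j (Nat.lt_succ_self j), ht j (Nat.lt_succ_self j)]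
    exact ih (fun k hk => ht k (Nat.lt_succ_of_lt hk))
      (fun k hk => hv k (Nat.lt_succ_of_lt hk)) _

-- the reversed while loop equals the countdown index loop
theorem goRev_eq_assign (rt rv : List String) (loc : PySem.Dict String String) :
    pvGoRev rt rv loc =
      splitB_assign rt.reverse rv.reverse ((rt.length : Int) - (rv.length : Int))
        rt.length loc := by
  induction rt generalizing rv loc with
  | nil => simp [pvGoRev, splitB_assign]
  | cons t rt ih =>
    match rv with
    | [] =>
      simp only [pvGoRev, List.reverse_cons, List.reverse_nil, List.length_cons,
        List.length_nil, Nat.cast_add, Nat.cast_one, Nat.cast_zero, sub_zero]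
      rw [splitB_assign]
      rw [if_neg (by omega)]
      have htgt : PySem.List.pyGetD (rt.reverse ++ [t]) ((rt.length : Int)) "" = t := by
        rw [PySem.List.pyGetD_natCast, show rt.length = rt.reverse.length by simp]
        simp
      rw [htgt]
      have hih := ih [] (loc.insert t "")
      simp only [List.reverse_nil, List.length_nil, Nat.cast_zero, sub_zero] at hih
      rw [hih]
      refine splitB_assign_ext rt.length _ _ _ _ _ _ ?_ ?_ _
      · intro j hj
        rw [PySem.List.pyGetD_natCast, PySem.List.pyGetD_natCast,
          List.getD_append _ _ _ _ (by simpa using hj)]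
      · intro j hj
        rw [if_neg (by omega), if_neg (by omega)]
    | v :: rv =>
      simp only [pvGoRev, List.reverse_cons, List.length_cons, Nat.cast_add, Nat.cast_one]
      rw [splitB_assign]
      rw [if_pos (by omega)]
      have hidx : ((rt.length : Int)) - (((rt.length : Int) + 1) - ((rv.length : Int) + 1))
          = (rv.length : Int) := by ring
      rw [hidx]
      have hval : PySem.List.pyGetD (rv.reverse ++ [v]) ((rv.length : Int)) "" = v := by
        rw [PySem.List.pyGetD_natCast, show rv.length = rv.reverse.length by simp]
        simp
      have htgt : PySem.List.pyGetD (rt.reverse ++ [t]) ((rt.length : Int)) "" = t := by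
        rw [PySem.List.pyGetD_natCast, show rt.length = rt.reverse.length by simp]
        simp
      rw [hval, htgt, ih rv]
      refine splitB_assign_ext rt.length _ _ _ _ _ _ ?_ ?_ _
      · intro j hj
        rw [PySem.List.pyGetD_natCast, PySem.List.pyGetD_natCast,
          List.getD_append _ _ _ _ (by simpa using hj)]
      · intro j hj
        by_cases hc : ((j : Int)) ≥ (rt.length : Int) - (rv.length : Int)
        · rw [if_pos hc, if_pos (by omega)]
          have e : ((j : Int)) - (((rt.length : Int) + 1) - ((rv.length : Int) + 1))
              = ((j : Int)) - ((rt.length : Int) - (rv.length : Int)) := by ring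
          rw [e]
          obtain ⟨m, hm, hmlt⟩ : ∃ m : Nat,
              ((j : Int)) - ((rt.length : Int) - (rv.length : Int)) = (m : Int)
              ∧ m < rv.length := ⟨(j + rv.length - rt.length : Nat), by omega, by omega⟩
          rw [hm, PySem.List.pyGetD_natCast, PySem.List.pyGetD_natCast,
            List.getD_append _ _ _ _ (by simpa using hmlt)]
        · rw [if_neg hc, if_neg (by omega)]

-- one row: A's inner while equals B's countdown assignment
theorem inner_eq (ts vs : List String) (loc : PySem.Dict String String) :
    splitA_while ts vs loc =
      splitB_assign ts vs ((ts.length : Int) - (vs.length : Int)) ts.length loc := by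
  conv_lhs => rw [← List.reverse_reverse ts, ← List.reverse_reverse vs]
  rw [splitA_while_eq_goRev, goRev_eq_assign]
  simp

-- B's row recursion over an appended row list
theorem splitB_rows_append (r1 r2 : List (String × String × String))
    (loc : PySem.Dict String String) :
    splitB_rows (r1 ++ r2) loc = splitB_rows r2 (splitB_rows r1 loc) := by
  induction r1 generalizing loc with
  | nil => rfl
  | cons r r1 ih =>
    obtain ⟨src, sep, dst⟩ := r
    simp only [List.cons_append, splitB_rows]
    exact ih _

-- zip with one element appended on the left, when the right list is strictly longer
theorem zip_concat_left {α β : Type} (l1 : List α) (x : α) (l2 : List β) (y : β)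
    (h : l2[l1.length]? = some y) :
    (l1 ++ [x]).zip l2 = l1.zip l2 ++ [(x, y)] := by
  induction l1 generalizing l2 with
  | nil =>
    match l2 with
    | [] => simp at h
    | b :: l2 => simp at h; simp [h]
  | cons a l1 ih =>
    match l2 with
    | [] => simp at h
    | b :: l2 =>
      simp only [List.length_cons, List.getElem?_cons_succ] at h
      simp only [List.cons_append, List.zip_cons_cons, ih l2 h]

-- one row of A (at a valid index) equals one row of B
theorem step_eq_row (sf sp st : List String) (n : Nat) (loc : PySem.Dict String String)
    (_hf : n < sf.length) (_hp : n < sp.length) (_ht : n < st.length) :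
    splitA_step sf sp st loc (n : Int) =
      splitB_rows [(sf.getD n "", sp.getD n "", st.getD n "")] loc := by
  unfold splitA_step splitB_rows pvPop
  simp only [PySem.List.pyGetD_natCast]
  rw [inner_eq]
  rfl

-- the main outer lemma: A's indexed fold equals B's fold over the zipped rows
theorem outer_eq (sf sp st : List String) (hp : sf.length ≤ sp.length)
    (ht : sf.length ≤ st.length) (loc : PySem.Dict String String) :
    (PySem.List.pyRange 0 (sf.length : Int) 1).foldl
        (fun acc s => splitA_step sf sp st acc s) loc =
      splitB_rows (sf.zip (sp.zip st)) loc := by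
  induction sf using List.reverseRecOn generalizing loc with
  | nil => simp [PySem.List.pyRange_one_eq_nil, splitB_rows]
  | append_singleton sf' x ih =>
    simp only [List.length_append, List.length_singleton] at hp ht ⊢
    have hzy : (sp.zip st)[sf'.length]? = some (sp.getD sf'.length "", st.getD sf'.length "") := by
      have h1 : sf'.length < sp.length := by omega
      have h2 : sf'.length < st.length := by omega
      rw [List.getElem?_zip_eq_some]
      constructor
      · rw [List.getElem?_eq_getElem h1, List.getD_eq_getElem sp "" h1]
      · rw [List.getElem?_eq_getElem h2, List.getD_eq_getElem st "" h2]
    rw [zip_concat_left sf' x (sp.zip st) _ hzy, splitB_rows_append]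
    have hrange : PySem.List.pyRange 0 ((sf'.length : Int) + 1) 1 =
        PySem.List.pyRange 0 (sf'.length : Int) 1 ++ [(sf'.length : Int)] :=
      PySem.List.pyRange_one_succ_right (by positivity)
    push_cast
    rw [hrange, List.foldl_append]
    simp only [List.foldl_cons, List.foldl_nil]
    have hcongr : (PySem.List.pyRange 0 (sf'.length : Int) 1).foldl
        (fun acc s => splitA_step (sf' ++ [x]) sp st acc s) loc =
        (PySem.List.pyRange 0 (sf'.length : Int) 1).foldl
        (fun acc s => splitA_step sf' sp st acc s) loc := by
      refine PySem.List.foldl_congr_mem _ _ _ _ (fun acc s hs => ?_)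
      rw [PySem.List.mem_pyRange_one] at hs
      obtain ⟨m, rfl⟩ : ∃ m : Nat, s = (m : Int) := ⟨s.toNat, by omega⟩
      have hm : m < sf'.length := by exact_mod_cast hs.2
      unfold splitA_step
      simp only [PySem.List.pyGetD_natCast, List.getD_append _ _ _ _ hm]
    rw [hcongr, ih (by omega) (by omega)]
    have hstep : splitA_step (sf' ++ [x]) sp st (splitB_rows (sf'.zip (sp.zip st)) loc)
        ((sf'.length : Int)) = splitB_rows [(x, sp.getD sf'.length "", st.getD sf'.length "")]
        (splitB_rows (sf'.zip (sp.zip st)) loc) := by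
      have := step_eq_row (sf' ++ [x]) sp st sf'.length (splitB_rows (sf'.zip (sp.zip st)) loc)
        (by simp) (by omega) (by omega)
      rw [this]
      congr 1
      rw [show sf'.length = sf'.length + 0 by rfl]
      simp
    rw [hstep]

-- ===== VERDICT (by name: the statement is the Claim_ definition above) =====
theorem split_var_spec : Claim_equal_split_var := by
  intro config loc _hdom hpre
  unfold Spec_split_var split_var split_var_alt
  dsimp only
  unfold Pre_split_var at hpre
  cases hsf : (PySem.Dict.mk config).get? "split_from" with
  | none => rw [hsf] at hpre; simp at hpre
  | some sf =>
    rw [hsf] at hpre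
    dsimp only at hpre
    simp only [Option.getD_some]
    by_cases hemp : sf.isEmpty
    · rw [if_pos hemp]
      have : sf = [] := by simpa using hemp
      subst this
      simp [PySem.List.pyRange_one_eq_nil]
    · rw [if_neg hemp]
      simp only [Bool.not_eq_true] at hemp
      rw [hemp] at hpre
      simp only [Bool.false_or] at hpre
      cases hsp : (PySem.Dict.mk config).get? "splitter" with
      | none => rw [hsp] at hpre; simp at hpre
      | some sp =>
        cases hst : (PySem.Dict.mk config).get? "split_to" with
        | none => rw [hsp, hst] at hpre; simp at hpre
        | some st =>
          rw [hsp, hst] at hpre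
          dsimp only at hpre
          simp only [Option.getD_some]
          unfold pvPreCore at hpre
          simp only [Bool.and_eq_true, decide_eq_true_eq] at hpre
          obtain ⟨⟨h1, h2⟩, -⟩ := hpre
          rw [outer_eq sf sp st h1 h2]
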